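-- pv_equiv track=rewrite | github.com/robertinglin/contextforge | contextforge/commit/patch.py | _parse_simplified_patch_hunks
-- ===== SOURCE A (Python) =====
-- def _parse_simplified_patch_hunks(patch_str: str) -> list[dict]:
--     """
--     Parse patch string using '@@' as a simple hunk separator, ignoring line numbers.
--     """
--     hunks: list[dict] = []
--     current_hunk_lines: list[str] = []
--
--     lines = patch_str.strip().splitlines()
--
--     # Skip file headers (---, +++, diff --git, Index:, etc.)
--     start_idx = 0
--     for i, line in enumerate(lines):
--         # Stop at first @@ or first actual diff line
--         if line.strip() == "@@":
--             start_idx = i + 1  # Start after the @@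
--             break
--         if (
--             line
--             and line[0] in ("+", "-", " ")
--             and not (line.startswith("--- ") or line.startswith("+++ "))
--         ):
--             start_idx = i
--             break
--
--     # Process the lines after headers
--     lines = lines[start_idx:]
--
--     for line in lines:
--         if line.strip() == "@@":
--             if current_hunk_lines:
--                 hunks.append({"lines": current_hunk_lines})
--                 current_hunk_lines = []
--         else:
--             if line == "" or (line[:1] in (" ", "+", "-") and not (line.startswith("--- ") or line.startswith("+++ "))):
--                 current_hunk_lines.append(line)
--
--     if current_hunk_lines:
--         hunks.append({"lines": current_hunk_lines})
--
--     return hunks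
-- ===== SOURCE B (Python) =====
-- def _parse_simplified_patch_hunks(patch_str: str) -> list[dict]:
--     """Find the header end with next() over enumerate, then build the hunk list by
--     recursion: cut the remaining lines at the first '@@' separator, filter the body,
--     and recurse on the tail."""
--     lines = patch_str.strip().splitlines()
--
--     def is_sep(l):
--         return l.strip() == "@@"
--
--     def is_diff(l):
--         return bool(l) and l[0] in ("+", "-", " ") and not (l.startswith("--- ") or l.startswith("+++ "))
--
--     def keep(l):
--         return l == "" or is_diff(l)
--
--     hit = next(((i, l) for i, l in enumerate(lines) if is_sep(l) or is_diff(l)), None)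
--     start = 0 if hit is None else (hit[0] + 1 if is_sep(hit[1]) else hit[0])
--
--     def build(rest):
--         if not rest:
--             return []
--         for j, l in enumerate(rest):
--             if is_sep(l):
--                 body, after = rest[:j], rest[j + 1:]
--                 break
--         else:
--             body, after = rest, None
--         seg = [x for x in body if keep(x)]
--         head = [] if not seg else [{"lines": seg}]
--         return head + (build(after) if after is not None else [])
--
--     return build(lines[start:])
-- ===== Notes on version B (the rewrite author's own statement) =====
-- stated objective: alternative
-- what changed: Replaced A's two accumulator loops by a different decomposition: the header skip becomes a single find-first over enumerate, and the hunk loop becomes a recursion that cuts the lines at each '@@' separator, filters the cut body, and recurses on the tail instead of carrying a running hunk accumulator and flushing it.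
import Mathlib
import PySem

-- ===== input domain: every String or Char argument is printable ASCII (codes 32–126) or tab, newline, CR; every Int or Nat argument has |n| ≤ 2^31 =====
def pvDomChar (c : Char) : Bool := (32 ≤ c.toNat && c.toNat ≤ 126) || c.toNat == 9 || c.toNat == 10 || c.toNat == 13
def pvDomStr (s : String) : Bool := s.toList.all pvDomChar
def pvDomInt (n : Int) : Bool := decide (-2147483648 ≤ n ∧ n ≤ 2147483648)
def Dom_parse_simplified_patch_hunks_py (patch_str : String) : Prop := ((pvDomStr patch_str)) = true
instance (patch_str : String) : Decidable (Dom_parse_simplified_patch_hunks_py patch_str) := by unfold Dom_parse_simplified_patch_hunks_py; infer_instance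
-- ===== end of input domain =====

-- B replaces A's two accumulator loops by a find-first for the header skip and a
-- recursion cutting at '@@' separators for the hunks (alternative decomposition, same cost).

-- ===== PORT A =====
-- the header-skip loop: returns start_idx (0 if the loop never breaks)
def paFindStart : List String → Nat → Nat
  | [], _ => 0
  | l :: rest, i =>
    if PySem.Str.strip l == "@@" then i + 1
    else if l ≠ "" && ((PySem.Str.pyGet? l 0).any fun c => c == '+' || c == '-' || c == ' ')
            && !(PySem.Str.startswith l "--- " || PySem.Str.startswith l "+++ ") then i
    else paFindStart rest (i + 1)

-- one iteration of A's accumulate-and-flush loop; state = (hunks, current_hunk_lines)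
def paStep (st : List (List (String × List String)) × List String) (line : String) :
    List (List (String × List String)) × List String :=
  if PySem.Str.strip line == "@@" then
    if st.2 ≠ [] then (st.1 ++ [[("lines", st.2)]], []) else st
  else
    if line == "" || ((PySem.Str.slice line none (some 1) == " "
          || PySem.Str.slice line none (some 1) == "+"
          || PySem.Str.slice line none (some 1) == "-")
        && !(PySem.Str.startswith line "--- " || PySem.Str.startswith line "+++ ")) then
      (st.1, st.2 ++ [line])
    else st

def parse_simplified_patch_hunks_py (patch_str : String) : List (List (String × List String)) :=
  let lines := PySem.Str.splitlines (PySem.Str.strip patch_str)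
  let lines := lines.drop (paFindStart lines 0)
  let st := lines.foldl paStep ([], [])
  if st.2 ≠ [] then st.1 ++ [[("lines", st.2)]] else st.1

-- ===== PORT B =====
def pbIsSep (l : String) : Bool := PySem.Str.strip l == "@@"

def pbIsDiff (l : String) : Bool :=
  l ≠ "" && ((PySem.Str.pyGet? l 0).any fun c => c == '+' || c == '-' || c == ' ')
    && !(PySem.Str.startswith l "--- " || PySem.Str.startswith l "+++ ")

def pbKeep (l : String) : Bool := l == "" || pbIsDiff l

-- next(((i, l) for i, l in enumerate(lines) if is_sep(l) or is_diff(l)), None) and the start index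
def pbStart (lines : List String) : Nat :=
  match (PySem.List.enumerate lines 0).find? (fun p => pbIsSep p.2 || pbIsDiff p.2) with
  | none => 0
  | some (i, l) => if pbIsSep l then (i + 1).toNat else i.toNat

-- build(rest): cut at the first '@@' (body = rest[:j]; after = rest[j:] or None),
-- emit the filtered body if non-empty, recurse on the tail after the separator
def pbBuild (rest : List String) : List (List (String × List String)) :=
  if rest.isEmpty then []
  else
    let seg := (rest.takeWhile (fun l => !pbIsSep l)).filter pbKeep
    let after := rest.dropWhile (fun l => !pbIsSep l)
    (if seg = [] then [] else [[("lines", seg)]]) ++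
      (if _h : after = [] then [] else pbBuild after.tail)
termination_by rest.length
decreasing_by
  have h1 := List.length_dropWhile_le (p := fun l => !pbIsSep l) (l := rest)
  have h2 : 0 < (rest.dropWhile (fun l => !pbIsSep l)).length := List.length_pos_iff.mpr _h
  have h3 : (rest.dropWhile (fun l => !pbIsSep l)).tail.length
      = (rest.dropWhile (fun l => !pbIsSep l)).length - 1 := List.length_tail
  omega

def parse_simplified_patch_hunks_py_alt (patch_str : String) : List (List (String × List String)) :=
  let lines := PySem.Str.splitlines (PySem.Str.strip patch_str)
  pbBuild (lines.drop (pbStart lines))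

-- ===== PRECONDITION & SPEC =====
def Spec_parse_simplified_patch_hunks_py (patch_str : String) (out : List (List (String × List String))) : Prop := out = parse_simplified_patch_hunks_py_alt patch_str
instance (patch_str : String) (out : List (List (String × List String))) : Decidable (Spec_parse_simplified_patch_hunks_py patch_str out) := by unfold Spec_parse_simplified_patch_hunks_py; infer_instance

-- ===== CLAIM (what is proved, stated in full; the proofs are below) =====
def Claim_equal_parse_simplified_patch_hunks_py : Prop := ∀ (patch_str : String), Dom_parse_simplified_patch_hunks_py patch_str → Spec_parse_simplified_patch_hunks_py patch_str (parse_simplified_patch_hunks_py patch_str)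

-- ===== LEMMAS AND PROOFS =====

-- A's final flush, as a helper for stating the loop invariant
def paFinish (st : List (List (String × List String)) × List String) :
    List (List (String × List String)) :=
  if st.2 ≠ [] then st.1 ++ [[("lines", st.2)]] else st.1

-- A's inline keep condition (on line[:1]) is B's pbKeep (on line[0])
theorem keep_eq (l : String) :
    (l == "" || ((PySem.Str.slice l none (some 1) == " "
          || PySem.Str.slice l none (some 1) == "+"
          || PySem.Str.slice l none (some 1) == "-")
        && !(PySem.Str.startswith l "--- " || PySem.Str.startswith l "+++ "))) = pbKeep l := by
  rcases h : l.toList with _ | ⟨c, cs⟩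
  · have hl : l = "" := String.ext_iff.mpr (by simp [h])
    subst hl
    simp [pbKeep]
  · have hne : l ≠ "" := by
      intro hl; rw [hl] at h; simp at h
    have h1 : PySem.List.slice (c :: cs) none (some 1) = [c] := by
      have h2 := PySem.List.slice_to_natCast (xs := c :: cs) (b := 1)
      norm_num at h2
      simpa using h2
    simp only [pysem, pbKeep, pbIsDiff, PySem.Str.slice, PySem.Chars.slice, h, h1]
    simp [hne]
    have key : ∀ (d : Char) (s : String), s.toList = [d] →
        (String.ofList [c] == s) = (c == d) := by
      intro d s hs
      by_cases hc : c = d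
      · subst hc
        have : String.ofList [c] = s := String.ext_iff.mpr (by simp [hs, String.toList_ofList])
        simp [this]
      · simp [String.ext_iff, String.toList_ofList, hs, hc]
    rw [key ' ' " " (by decide), key '+' "+" (by decide), key '-' "-" (by decide)]
    cases hs : (c == ' ') <;> cases hp : (c == '+') <;> cases hm : (c == '-') <;> simp_all

-- unfolding of A's header loop on a cons, phrased with B's predicates (definitionally equal)
theorem paFindStart_cons (l : String) (rest : List String) (n : Nat) :
    paFindStart (l :: rest) n =
      if pbIsSep l then n + 1
      else if pbIsDiff l then n
      else paFindStart rest (n + 1) := rfl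

-- the header-skip loop as a find-first over enumerate, with an arbitrary start offset
theorem findStart_gen (ls : List String) : ∀ (n : Nat),
    paFindStart ls n =
      match (PySem.List.enumerate ls (n : Int)).find? (fun p => pbIsSep p.2 || pbIsDiff p.2) with
      | none => 0
      | some (i, l) => if pbIsSep l then (i + 1).toNat else i.toNat := by
  induction ls with
  | nil => intro n; simp [paFindStart, PySem.List.enumerate_nil]
  | cons l rest ih =>
    intro n
    rw [PySem.List.enumerate_cons, paFindStart_cons]
    by_cases hsep : pbIsSep l = true
    · rw [List.find?_cons_of_pos (by simp [hsep])]
      simp [hsep]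
    · by_cases hdiff : pbIsDiff l = true
      · rw [List.find?_cons_of_pos (by simp [hdiff])]
        simp [hsep, hdiff]
      · rw [List.find?_cons_of_neg (by simp [hsep, hdiff])]
        rw [show ((n : Int) + 1) = ((n + 1 : Nat) : Int) by push_cast; ring]
        rw [← ih (n + 1)]
        simp [hsep, hdiff]

theorem start_eq (ls : List String) : paFindStart ls 0 = pbStart ls := by
  have h := findStart_gen ls 0
  simpa [pbStart] using h

-- one-step unfolding of pbBuild, valid also on []
theorem pbBuild_unfold (rest : List String) :
    pbBuild rest =
      (if (rest.takeWhile (fun l => !pbIsSep l)).filter pbKeep = [] then []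
       else [[("lines", (rest.takeWhile (fun l => !pbIsSep l)).filter pbKeep)]]) ++
      (if (rest.dropWhile (fun l => !pbIsSep l)) = [] then []
       else pbBuild (rest.dropWhile (fun l => !pbIsSep l)).tail) := by
  cases rest with
  | nil => rw [pbBuild.eq_def]; simp
  | cons r rs =>
    rw [pbBuild.eq_def]
    simp only [List.isEmpty_cons, dite_eq_ite, Bool.false_eq_true, if_false]

-- main invariant: A's flushing fold with pending lines `pre` equals the cut-and-filter recursion
theorem main_inv (ls : List String) :
    ∀ (hunks : List (List (String × List String))) (pre : List String),
    paFinish (ls.foldl paStep (hunks, pre)) =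
      (hunks ++
        (if pre ++ (ls.takeWhile (fun l => !pbIsSep l)).filter pbKeep = [] then []
         else [[("lines", pre ++ (ls.takeWhile (fun l => !pbIsSep l)).filter pbKeep)]])) ++
      (if (ls.dropWhile (fun l => !pbIsSep l)) = [] then []
       else pbBuild (ls.dropWhile (fun l => !pbIsSep l)).tail) := by
  induction ls with
  | nil =>
    intro hunks pre
    by_cases hp : pre = [] <;> simp [paFinish, hp]
  | cons l rest ih =>
    intro hunks pre
    simp only [List.foldl_cons, paStep]
    by_cases hsep : (PySem.Str.strip l == "@@") = true
    · have hsepB : pbIsSep l = true := hsep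
      rw [if_pos hsep]
      rw [List.takeWhile_cons, List.dropWhile_cons]
      simp only [hsepB, Bool.not_true, Bool.false_eq_true, if_false, List.tail_cons]
      by_cases hp : pre ≠ []
      · rw [if_pos hp, ih (hunks ++ [[("lines", pre)]]) []]
        rw [pbBuild_unfold rest]
        simp [hp]
      · rw [if_neg hp]
        rw [not_not] at hp
        subst hp
        rw [ih hunks []]
        rw [pbBuild_unfold rest]
        simp
    · have hsepB : pbIsSep l = false := by
        simp only [pbIsSep]
        exact Bool.not_eq_true _ ▸ (by simpa using hsep)
      rw [if_neg hsep]
      rw [List.takeWhile_cons, List.dropWhile_cons]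
      simp only [hsepB, Bool.not_false, if_true]
      rw [keep_eq l]
      by_cases hk : pbKeep l = true
      · rw [if_pos hk, ih hunks (pre ++ [l])]
        simp [hk]
      · rw [if_neg hk, ih hunks pre]
        have hk' : pbKeep l = false := by simpa using hk
        simp [hk']

-- A's phase-2 fold (plus the final flush) computes exactly B's recursion
theorem main_top (ls : List String) : paFinish (ls.foldl paStep ([], [])) = pbBuild ls := by
  rw [main_inv ls [] []]
  simp only [List.nil_append]
  rw [← pbBuild_unfold]

-- ===== VERDICT (by name: the statement is the Claim_ definition above) =====
theorem parse_simplified_patch_hunks_py_spec : Claim_equal_parse_simplified_patch_hunks_py := by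
  intro patch_str _
  unfold Spec_parse_simplified_patch_hunks_py
  show parse_simplified_patch_hunks_py patch_str = _
  simp only [parse_simplified_patch_hunks_py, parse_simplified_patch_hunks_py_alt]
  rw [start_eq]
  have hfin : ∀ st : List (List (String × List String)) × List String,
      (if st.2 ≠ [] then st.1 ++ [[("lines", st.2)]] else st.1) = paFinish st := fun _ => rfl
  rw [hfin, main_top]
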